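-- pv_equiv track=rewrite | github.com/MacHu-GWU/pygitrepo-project | pygitrepo/helpers.py | s3_key_smart_join
-- ===== SOURCE A (Python) =====
-- def s3_key_smart_join(parts, is_dir):
--     """
--     Note, it assume that there's no such double slack in your path. It ensure
--     that there's only one consecutive "/" in the s3 key.
--
--     :type parts: typing.List[str]
--     :param parts: list of s3 key path parts, could have "/"
--
--     :type is_dir: bool
--     :param is_dir: if True, the s3 key ends with "/". otherwise enforce no
--         tailing "/".
--
--     :rtype: str
--
--     Example::
--
--         >>> s3_key_smart_join(parts=["/a/", "b/", "/c"], is_dir=True)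
--         a/b/c/
--
--         >>> s3_key_smart_join(parts=["/a/", "b/", "/c"], is_dir=False)
--         a/b/c
--     """
--     new_parts = list()
--     for part in parts:
--         new_parts.extend([chunk for chunk in part.split("/") if chunk])
--     key = "/".join(new_parts)
--     if is_dir:
--         return key + "/"
--     else:
--         return key
-- ===== SOURCE B (Python) =====
-- def s3_key_smart_join(parts, is_dir):
--     # Streaming state machine over the characters: emit non-slash chars,
--     # owing a single "/" separator whenever a slash (or part boundary) is
--     # seen after some output; no split/join of chunks at all.
--     out = []
--     pending = False
--     for part in parts:
--         for c in part + "/":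
--             if c == "/":
--                 pending = bool(out)
--             else:
--                 if pending:
--                     out.append("/")
--                     pending = False
--                 out.append(c)
--     key = "".join(out)
--     if is_dir:
--         return key + "/"
--     else:
--         return key
-- ===== Notes on version B (the rewrite author's own statement) =====
-- stated objective: alternative
-- what changed: Replaces A's chunk pipeline (split each part on '/', filter empty chunks, extend an accumulator list, '/'.join at the end) by a character-level streaming state machine: one pass over the characters of all parts (with a virtual '/' at each part boundary) that emits non-slash characters directly and owes exactly one '/' separator whenever a slash is seen after some output; no split, no chunk list, no join.
import Mathlib
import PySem

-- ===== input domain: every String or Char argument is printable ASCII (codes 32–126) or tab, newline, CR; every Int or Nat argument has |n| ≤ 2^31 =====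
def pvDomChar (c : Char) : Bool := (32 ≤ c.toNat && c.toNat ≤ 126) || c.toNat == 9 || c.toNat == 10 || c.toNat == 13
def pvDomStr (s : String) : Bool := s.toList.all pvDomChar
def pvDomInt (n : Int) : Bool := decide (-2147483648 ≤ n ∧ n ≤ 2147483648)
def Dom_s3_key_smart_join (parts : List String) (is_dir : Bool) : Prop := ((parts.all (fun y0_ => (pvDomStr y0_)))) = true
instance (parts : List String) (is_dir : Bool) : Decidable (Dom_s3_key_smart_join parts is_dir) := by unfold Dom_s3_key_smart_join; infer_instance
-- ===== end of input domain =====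

-- B replaces A's chunk pipeline (split each part, filter, rejoin) by a character-level
-- state machine that emits chars and owes a single "/" separator (alternative decomposition).


-- ===== PORT A =====
-- loop `for part in parts: new_parts.extend([chunk for chunk in part.split("/") if chunk])`;
-- part.split("/") is PySem.Chars.splitOn (sep nonempty, exact), truthiness `if chunk` = nonempty.
def s3_key_smart_join (parts : List String) (is_dir : Bool) : String :=
  let new_parts : List (List Char) :=
    parts.foldl
      (fun acc part =>
        acc ++ (PySem.Chars.splitOn part.toList ['/']).filter (fun chunk => !chunk.isEmpty)) []
  let key : List Char := PySem.Chars.join ['/'] new_parts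
  if is_dir then String.ofList (key ++ ['/']) else String.ofList key

-- ===== PORT B =====
-- the loop body of Source B: on '/', owe a separator iff output nonempty; otherwise emit the
-- owed separator (if any) and the char.  State = (out, pending).
def pvStepB (st : List Char × Bool) (c : Char) : List Char × Bool :=
  if c = '/' then (st.1, !st.1.isEmpty)
  else if st.2 then (st.1 ++ ['/', c], false) else (st.1 ++ [c], false)

def s3_key_smart_join_alt (parts : List String) (is_dir : Bool) : String :=
  let st : List Char × Bool :=
    parts.foldl (fun st part => (part.toList ++ ['/']).foldl pvStepB st) ([], false)
  if is_dir then String.ofList (st.1 ++ ['/']) else String.ofList st.1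

-- ===== PRECONDITION & SPEC =====
def Spec_s3_key_smart_join (parts : List String) (is_dir : Bool) (out : String) : Prop := out = s3_key_smart_join_alt parts is_dir
instance (parts : List String) (is_dir : Bool) (out : String) : Decidable (Spec_s3_key_smart_join parts is_dir out) := by unfold Spec_s3_key_smart_join; infer_instance

-- ===== CLAIM (what is proved, stated in full; the proofs are below) =====
def Claim_equal_s3_key_smart_join : Prop := ∀ (parts : List String) (is_dir : Bool), Dom_s3_key_smart_join parts is_dir → Spec_s3_key_smart_join parts is_dir (s3_key_smart_join parts is_dir)

-- ===== LEMMAS AND PROOFS =====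

-- simple structural recursion equal to Chars.splitOn on sep = ['/'] (proof-side model of the split)
def mySplitAux : List Char → List Char → List (List Char)
  | [], cur => [cur.reverse]
  | c :: rest, cur => if c = '/' then cur.reverse :: mySplitAux rest [] else mySplitAux rest (c :: cur)

theorem go_eq (l : List Char) : ∀ (cur : List Char) (acc : List (List Char)) (fuel : Nat), l.length < fuel →
    PySem.Chars.splitOn.go ['/'] fuel l cur acc = acc.reverse ++ mySplitAux l cur := by
  induction l with
  | nil =>
      intro cur acc fuel h
      cases fuel with
      | zero => omega
      | succ f =>
        rw [PySem.Chars.splitOn.go]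
        · simp [mySplitAux]
        · omega
  | cons c rest ih =>
      intro cur acc fuel h
      cases fuel with
      | zero => omega
      | succ f =>
        rw [PySem.Chars.splitOn.go]
        have hstep : rest.length < f := by simpa using Nat.lt_of_succ_lt_succ h
        by_cases hc : c = '/'
        · subst hc
          have hp : List.isPrefixOf ['/'] ('/' :: rest) = true := by simp [List.isPrefixOf]
          simp only [hp, if_true, List.length_cons, List.drop_succ_cons, List.length_nil, List.drop_zero]
          rw [ih [] (cur.reverse :: acc) f hstep]
          simp [mySplitAux]
        · have hp : List.isPrefixOf ['/'] (c :: rest) = false := by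
            simp [List.isPrefixOf]
            exact fun h' => hc h'.symm
          simp only [hp, Bool.false_eq_true, if_false]
          rw [ih (c :: cur) acc f hstep]
          simp [mySplitAux, hc]

theorem splitOn_eq (s : List Char) : PySem.Chars.splitOn s ['/'] = mySplitAux s [] := by
  simpa using go_eq s [] [] (s.length + 1) (by omega)

theorem mySplitAux_append (a : List Char) : ∀ (b cur : List Char),
    mySplitAux (a ++ '/' :: b) cur = mySplitAux a cur ++ mySplitAux b [] := by
  induction a with
  | nil => intro b cur; simp [mySplitAux]
  | cons c rest ih =>
      intro b cur
      by_cases hc : c = '/' <;> simp [mySplitAux, hc, ih]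

-- proof-side model of Source B's machine and its closed form
def headSlash : List Char → Bool
  | [] => false
  | c :: _ => c == '/'

def runD : Bool → Bool → List Char → List Char
  | _, _, [] => []
  | p, ne, c :: r => if c = '/' then runD ne ne r else (if p then ['/'] else []) ++ c :: runD false true r

def Kf (l : List Char) : List Char :=
  PySem.Chars.join ['/'] ((mySplitAux l []).filter (fun c => !c.isEmpty))

def Ff (p ne : Bool) (l : List Char) : List Char :=
  (if (if headSlash l then ne else p) && !(Kf l).isEmpty then ['/'] else []) ++ Kf l

theorem foldl_step (l : List Char) : ∀ (out : List Char) (p : Bool),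
    (l.foldl pvStepB (out, p)).1 = out ++ runD p (!out.isEmpty) l := by
  induction l with
  | nil => intro out p; simp [runD]
  | cons c r ih =>
      intro out p
      by_cases hc : c = '/'
      · simp [hc, pvStepB, runD, ih]
      · have e1 : ∀ (o : List Char) (x : Char), (o ++ [x]).isEmpty = false := by
          intro o x; cases o <;> simp
        have e2 : ∀ (o : List Char) (x y : Char), (o ++ [x, y]).isEmpty = false := by
          intro o x y; cases o <;> simp
        cases p <;> simp [hc, pvStepB, runD, ih, e1, e2]

theorem join_cons (a : List Char) (l : List (List Char)) :
    PySem.Chars.join ['/'] (a :: l) = a ++ (if l.isEmpty then [] else '/' :: PySem.Chars.join ['/'] l) := by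
  cases l with
  | nil => simp [PySem.Chars.join, List.intercalate]
  | cons b bs => simp [PySem.Chars.join, List.intercalate, List.intersperse]

theorem Kf_isEmpty (t : List Char) :
    (Kf t).isEmpty = ((mySplitAux t []).filter (fun c => !c.isEmpty)).isEmpty := by
  unfold Kf
  cases h : (mySplitAux t []).filter (fun c => !c.isEmpty) with
  | nil => simp [PySem.Chars.join, List.intercalate]
  | cons a L =>
      have ha : a.isEmpty = false := by
        have hmem : a ∈ (mySplitAux t []).filter (fun c => !c.isEmpty) := by
          rw [h]; exact List.mem_cons_self
        have := List.of_mem_filter hmem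
        simpa using this
      rw [join_cons]
      cases a with
      | nil => simp at ha
      | cons x xs => simp

theorem Kf_slash_cons (r : List Char) : Kf ('/' :: r) = Kf r := by
  simp [Kf, mySplitAux]

theorem S_lemma (r : List Char) : ∀ (cur : List Char), cur ≠ [] →
    PySem.Chars.join ['/'] ((mySplitAux r cur).filter (fun c => !c.isEmpty)) = cur.reverse ++ Ff false true r := by
  induction r with
  | nil =>
      intro cur hcur
      have h1 : cur.reverse.isEmpty = false := by simp [hcur]
      simp [mySplitAux, Ff, Kf, headSlash, h1, PySem.Chars.join, List.intercalate]
  | cons c t ih =>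
      intro cur hcur
      by_cases hc : c = '/'
      · subst hc
        rw [show mySplitAux ('/' :: t) cur = cur.reverse :: mySplitAux t [] from by simp [mySplitAux]]
        rw [List.filter_cons_of_pos (by simp [hcur])]
        rw [join_cons]
        have h2 : ((mySplitAux t []).filter (fun c => !c.isEmpty)).isEmpty = (Kf t).isEmpty :=
          (Kf_isEmpty t).symm
        rw [h2]
        have h3 : PySem.Chars.join ['/'] ((mySplitAux t []).filter (fun c => !c.isEmpty)) = Kf t := rfl
        rw [h3]
        simp only [Ff, headSlash, Kf_slash_cons, beq_self_eq_true, if_true, Bool.true_and]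
        cases hK : (Kf t).isEmpty
        · simp
        · simp [List.isEmpty_iff.mp hK]
      · rw [show mySplitAux (c :: t) cur = mySplitAux t (c :: cur) from by simp [mySplitAux, hc]]
        rw [ih (c :: cur) (by simp)]
        have hK : Kf (c :: t) = c :: Ff false true t := by
          unfold Kf
          rw [show mySplitAux (c :: t) [] = mySplitAux t [c] from by simp [mySplitAux, hc]]
          simpa using ih [c] (by simp)
        simp [Ff, headSlash, hc, hK]

theorem Kf_cons (c : Char) (r : List Char) (hc : c ≠ '/') : Kf (c :: r) = c :: Ff false true r := by
  unfold Kf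
  rw [show mySplitAux (c :: r) [] = mySplitAux r [c] from by simp [mySplitAux, hc]]
  simpa using S_lemma r [c] (by simp)

theorem runD_eq (l : List Char) : ∀ (p ne : Bool), runD p ne l = Ff p ne l := by
  induction l with
  | nil => intro p ne; simp [runD, Ff, Kf, mySplitAux, PySem.Chars.join, List.intercalate]
  | cons c r ih =>
      intro p ne
      by_cases hc : c = '/'
      · subst hc
        rw [show runD p ne ('/' :: r) = runD ne ne r from by simp [runD]]
        rw [ih]
        have hs : headSlash ('/' :: r) = true := by simp [headSlash]
        simp only [Ff, hs, if_true, Kf_slash_cons, ite_self]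
      · rw [show runD p ne (c :: r) = (if p then ['/'] else []) ++ c :: runD false true r from by
            simp [runD, hc]]
        rw [ih]
        simp only [Ff, headSlash, Kf_cons c r hc]
        cases p <;> simp [hc]

theorem foldl_parts (parts : List String) : ∀ (st : List Char × Bool),
    parts.foldl (fun st part => (part.toList ++ ['/']).foldl pvStepB st) st
      = (parts.flatMap (fun p => p.toList ++ ['/'])).foldl pvStepB st := by
  induction parts with
  | nil => intro st; simp
  | cons p ps ih =>
      intro st
      rw [List.foldl_cons, ih, List.flatMap_cons]
      simp [List.foldl_append]

theorem splitB (parts : List String) :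
    mySplitAux (parts.flatMap (fun p => p.toList ++ ['/'])) []
      = (parts.flatMap (fun p => mySplitAux p.toList [])) ++ [[]] := by
  induction parts with
  | nil => simp [mySplitAux]
  | cons p ps ih =>
      rw [List.flatMap_cons,
        show (p.toList ++ ['/']) ++ ps.flatMap (fun p => p.toList ++ ['/'])
            = p.toList ++ '/' :: ps.flatMap (fun p => p.toList ++ ['/']) from by simp,
        mySplitAux_append, ih]
      simp

theorem key_eq (parts : List String) :
    (parts.foldl (fun st part => (part.toList ++ ['/']).foldl pvStepB st) ([], false)).1
      = PySem.Chars.join ['/']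
          (parts.foldl
            (fun acc part =>
              acc ++ (PySem.Chars.splitOn part.toList ['/']).filter (fun chunk => !chunk.isEmpty)) []) := by
  rw [foldl_parts, foldl_step, PySem.List.foldl_append_eq_flatMap]
  simp only [splitOn_eq, List.nil_append, List.isEmpty_nil, Bool.not_true]
  rw [runD_eq]
  simp [Ff, Kf, splitB parts, List.filter_append, List.filter_flatMap]

-- ===== VERDICT (by name: the statement is the Claim_ definition above) =====
theorem s3_key_smart_join_spec : Claim_equal_s3_key_smart_join := by
  intro parts is_dir _
  unfold Spec_s3_key_smart_join
  simp only [s3_key_smart_join, s3_key_smart_join_alt]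
  rw [key_eq]
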